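-- pv_equiv track=rewrite | github.com/nordange/advent-of-code | 2022/10/cathode_ray.py | draw_crt
-- ===== SOURCE A (Python) =====
-- def draw_crt(register: list, screen_height: int, screen_width: int) -> list:
--     """
--     Register X controls the horizontal position of a sprite.
--     The sprite is 3 pixels wide.
--     Register X sets the horizontal position of the middle of the sprite.
--     The CRT draws a single pixel during each cycle.
--     Determine whether the sprite is visible the instant each pixel is drawn
--     """
--
--     curr_cycle = 0
--     crt_lines = []
--     for row in range(0, screen_height):
--         curr_crt_line = ""
--         for x_pos in range(0, screen_width):
--             if (register[curr_cycle] >= x_pos - 1) and (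
--                 register[curr_cycle] <= x_pos + 1
--             ):
--                 curr_crt_line += "#"
--             else:
--                 curr_crt_line += "."
--             curr_cycle += 1
--
--         crt_lines.append(curr_crt_line)
--
--     return crt_lines
-- ===== SOURCE B (Python) =====
-- def draw_crt(register: list, screen_height: int, screen_width: int) -> list:
--     # One flat pass over all pixels, then reshape into rows by slicing.
--     pixels = "".join(
--         "#" if abs(register[c] - c % screen_width) <= 1 else "."
--         for c in range(screen_height * screen_width)
--     )
--     return [pixels[r * screen_width:(r + 1) * screen_width]
--             for r in range(screen_height)]
-- ===== Notes on version B (the rewrite author's own statement) =====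
-- stated objective: alternative
-- what changed: B computes all screen_height*screen_width pixels in one flat pass (column recovered as c % screen_width) and then reshapes the flat string into rows by slicing, replacing A's nested row/column loops with a manually carried cycle counter.
-- outside the precondition, e.g. on draw_crt([], -1, -1): A returns [], B raises IndexError
import Mathlib
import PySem

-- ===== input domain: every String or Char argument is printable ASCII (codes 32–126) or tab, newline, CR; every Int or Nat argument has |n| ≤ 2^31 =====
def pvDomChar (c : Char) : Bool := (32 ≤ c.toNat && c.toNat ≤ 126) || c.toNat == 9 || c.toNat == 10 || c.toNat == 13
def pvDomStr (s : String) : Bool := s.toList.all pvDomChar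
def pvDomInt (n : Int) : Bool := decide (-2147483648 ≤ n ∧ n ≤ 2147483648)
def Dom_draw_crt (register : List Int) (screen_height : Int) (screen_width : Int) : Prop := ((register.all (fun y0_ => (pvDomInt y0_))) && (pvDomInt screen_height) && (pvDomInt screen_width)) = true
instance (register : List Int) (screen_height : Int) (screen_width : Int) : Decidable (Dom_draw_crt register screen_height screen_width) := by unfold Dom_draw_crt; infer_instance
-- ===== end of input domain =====

-- B renders the screen as one flat pixel pass reshaped into rows by slicing, instead of A's
-- nested row/column loops with a manual cycle counter (alternative decomposition, same cost).

-- ===== PORT A =====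
-- register[curr_cycle] is pyGet?; the .getD 0 branch is only reached where Python raises
-- IndexError, which Pre_draw_crt excludes.
def draw_crt (register : List Int) (screen_height : Int) (screen_width : Int) : List String :=
  ((PySem.List.pyRange 0 screen_height 1).foldl
    (fun (st : Int × List String) (_row : Int) =>
      let inner := (PySem.List.pyRange 0 screen_width 1).foldl
        (fun (st2 : Int × String) (x_pos : Int) =>
          (st2.1 + 1,
            st2.2 ++ (if (PySem.List.pyGet? register st2.1).getD 0 ≥ x_pos - 1 ∧
                         (PySem.List.pyGet? register st2.1).getD 0 ≤ x_pos + 1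
                      then "#" else ".")))
        (st.1, "")
      (inner.1, st.2 ++ [inner.2]))
    ((0 : Int), ([] : List String))).2

-- ===== PORT B =====
def draw_crt_alt (register : List Int) (screen_height : Int) (screen_width : Int) : List String :=
  let pixels : List Char := (PySem.List.pyRange 0 (screen_height * screen_width) 1).map
    (fun c => if ((PySem.List.pyGet? register c).getD 0 - PySem.Int.mod c screen_width).natAbs ≤ 1
              then '#' else '.')
  (PySem.List.pyRange 0 screen_height 1).map
    (fun r => String.ofList (PySem.List.slice pixels (some (r * screen_width))
                                                     (some ((r + 1) * screen_width))))

-- ===== PRECONDITION & SPEC =====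
-- Pre_ excludes the inputs where A raises IndexError (positive dimensions with register shorter
-- than height*width), and — a stated narrowing — degenerate screens with BOTH dimensions negative
-- and register shorter than their (positive) product, where A returns [] but B's flat pixel pass
-- raises IndexError.
def Pre_draw_crt (register : List Int) (screen_height : Int) (screen_width : Int) : Prop :=
  ((0 < screen_height ∧ 0 < screen_width) ∨ (screen_height < 0 ∧ screen_width < 0)) →
    screen_height * screen_width ≤ (register.length : Int)
instance (register : List Int) (screen_height : Int) (screen_width : Int) : Decidable (Pre_draw_crt register screen_height screen_width) := by unfold Pre_draw_crt; infer_instance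
def pvWitness_draw_crt : List Int × Int × Int := ([0, 2, 1, 3], 2, 2)

def Spec_draw_crt (register : List Int) (screen_height : Int) (screen_width : Int) (out : List String) : Prop := out = draw_crt_alt register screen_height screen_width
instance (register : List Int) (screen_height : Int) (screen_width : Int) (out : List String) : Decidable (Spec_draw_crt register screen_height screen_width out) := by unfold Spec_draw_crt; infer_instance

-- ===== CLAIM (what is proved, stated in full; the proofs are below) =====
def Claim_equal_draw_crt : Prop := ∀ (register : List Int) (screen_height : Int) (screen_width : Int), Dom_draw_crt register screen_height screen_width → Pre_draw_crt register screen_height screen_width → Spec_draw_crt register screen_height screen_width (draw_crt register screen_height screen_width)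

-- ===== LEMMAS AND PROOFS =====

-- the pixel A draws at cycle c, column x
def pixA (register : List Int) (c x : Int) : Char :=
  if (PySem.List.pyGet? register c).getD 0 ≥ x - 1 ∧ (PySem.List.pyGet? register c).getD 0 ≤ x + 1
  then '#' else '.'

theorem innerA (register : List Int) (w : Int) (c0 : Int) (s : String) :
    (PySem.List.pyRange 0 w 1).foldl
        (fun (st2 : Int × String) (x_pos : Int) =>
          (st2.1 + 1,
            st2.2 ++ (if (PySem.List.pyGet? register st2.1).getD 0 ≥ x_pos - 1 ∧
                         (PySem.List.pyGet? register st2.1).getD 0 ≤ x_pos + 1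
                      then "#" else "."))) (c0, s)
    = (c0 + (w.toNat : Int),
       s ++ String.ofList ((List.range w.toNat).map (fun (x : Nat) => pixA register (c0 + (x : Int)) (x : Int)))) := by
  rw [PySem.List.pyRange_one]
  simp only [Int.sub_zero, Int.zero_add]
  generalize w.toNat = n
  induction n with
  | zero => simp
  | succ n ih =>
    rw [List.range_succ, List.map_append, List.foldl_append, ih]
    simp only [List.map_cons, List.map_nil, List.foldl_cons, List.foldl_nil]
    simp only [Prod.mk.injEq]
    constructor
    · push_cast; ring
    · rw [List.map_append, List.map_cons, List.map_nil]
      have : (if (PySem.List.pyGet? register (c0 + (n : Int))).getD 0 ≥ (n : Int) - 1 ∧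
                 (PySem.List.pyGet? register (c0 + (n : Int))).getD 0 ≤ (n : Int) + 1
              then "#" else ".") = String.ofList [pixA register (c0 + (n : Int)) (n : Int)] := by
        unfold pixA; split <;> rfl
      rw [this]
      simp [String.append_assoc]

theorem outerA (register : List Int) (h w : Int) (c0 : Int) (acc : List String) :
    (PySem.List.pyRange 0 h 1).foldl
      (fun (st : Int × List String) (_row : Int) =>
        let inner := (PySem.List.pyRange 0 w 1).foldl
          (fun (st2 : Int × String) (x_pos : Int) =>
            (st2.1 + 1,
              st2.2 ++ (if (PySem.List.pyGet? register st2.1).getD 0 ≥ x_pos - 1 ∧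
                           (PySem.List.pyGet? register st2.1).getD 0 ≤ x_pos + 1
                        then "#" else ".")))
          (st.1, "")
        (inner.1, st.2 ++ [inner.2])) (c0, acc)
    = (c0 + ((h.toNat * w.toNat : Nat) : Int),
       acc ++ (List.range h.toNat).map (fun r =>
         String.ofList ((List.range w.toNat).map (fun (x : Nat) =>
           pixA register (c0 + ((r * w.toNat : Nat) : Int) + (x : Int)) (x : Int))))) := by
  rw [PySem.List.pyRange_one 0 h]
  simp only [Int.sub_zero, Int.zero_add]
  generalize h.toNat = m
  induction m with
  | zero => simp
  | succ m ih =>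
    rw [List.range_succ, List.map_append, List.foldl_append, ih]
    simp only [List.map_cons, List.map_nil, List.foldl_cons, List.foldl_nil]
    rw [innerA]
    simp only [Prod.mk.injEq]
    constructor
    · push_cast; ring
    · rw [List.map_append, List.map_cons, List.map_nil, List.append_assoc]
      simp

theorem drawA_eq (register : List Int) (h w : Int) :
    draw_crt register h w
    = (List.range h.toNat).map (fun r =>
        String.ofList ((List.range w.toNat).map (fun (x : Nat) =>
          pixA register (((r * w.toNat : Nat) : Int) + (x : Int)) (x : Int)))) := by
  unfold draw_crt
  rw [outerA]
  simp

theorem drawB_eq (register : List Int) (h w : Int) :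
    draw_crt_alt register h w
    = (List.range h.toNat).map (fun (r : Nat) =>
        String.ofList (PySem.List.slice
          ((List.range (h * w).toNat).map (fun (k : Nat) =>
            if ((PySem.List.pyGet? register (k : Int)).getD 0 - PySem.Int.mod (k : Int) w).natAbs ≤ 1
            then '#' else '.'))
          (some ((r : Int) * w)) (some (((r : Int) + 1) * w)))) := by
  unfold draw_crt_alt
  rw [PySem.List.pyRange_one 0 h, PySem.List.pyRange_one 0 (h * w)]
  simp only [Int.sub_zero, Int.zero_add, List.map_map]
  rfl

theorem mod_row (b : Int) (hb : 0 < b) (x : Int) (hx : 0 ≤ x) (hxb : x < b) (r : Int) :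
    PySem.Int.mod (r * b + x) b = x := by
  rw [PySem.Int.mod_eq_emod_of_pos hb, Int.add_comm, Int.mul_comm, Int.add_mul_emod_self_left,
     Int.emod_eq_of_lt hx hxb]

theorem draw_crt_spec' (register : List Int) (h w : Int) :
    draw_crt register h w = draw_crt_alt register h w := by
  rw [drawA_eq, drawB_eq]
  apply List.map_congr_left
  intro r hr
  rw [List.mem_range] at hr
  have hpos : 0 < h := by
    by_contra hc
    have : h.toNat = 0 := by omega
    omega
  by_cases hw : 0 < w
  · -- positive width: the slice picks out exactly row r
    have hhw : (h * w).toNat = h.toNat * w.toNat := by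
      rcases Int.eq_ofNat_of_zero_le (le_of_lt hpos) with ⟨hn, rfl⟩
      rcases Int.eq_ofNat_of_zero_le (le_of_lt hw) with ⟨wn, rfl⟩
      norm_cast
    have e1 : (r : Int) * w = ((r * w.toNat : Nat) : Int) := by
      push_cast [Int.toNat_of_nonneg (le_of_lt hw)]; ring
    have e2 : ((r : Int) + 1) * w = ((r * w.toNat : Nat) : Int) + ((w.toNat : Nat) : Int) := by
      push_cast [Int.toNat_of_nonneg (le_of_lt hw)]; ring
    rw [e1, e2, PySem.List.slice_natCast_add, hhw]
    congr 1
    have hle : r * w.toNat + w.toNat ≤ h.toNat * w.toNat := by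
      have h1 := Nat.mul_le_mul_right w.toNat (Nat.succ_le_of_lt hr)
      rwa [Nat.succ_mul] at h1
    apply List.ext_getElem
    · simp
      omega
    · intro i hi1 hi2
      simp only [List.getElem_map, List.getElem_range, List.getElem_take, List.getElem_drop]
      have hiw : i < w.toNat := by simpa using hi1
      unfold pixA
      have hc : ((r * w.toNat : Nat) : Int) + (i : Int) = ((r * w.toNat + i : Nat) : Int) := by
        push_cast; ring
      rw [hc]
      apply if_congr _ rfl rfl
      have hm : PySem.Int.mod ((r * w.toNat + i : Nat) : Int) w = (i : Int) := by
        have : ((r * w.toNat + i : Nat) : Int) = (r : Int) * w + (i : Int) := by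
          push_cast [Int.toNat_of_nonneg (le_of_lt hw)]; ring
        rw [this]
        exact mod_row w hw (i : Int) (by positivity) (by omega) (r : Int)
      rw [hm]
      omega
  · -- non-positive width: every row is empty on both sides
    have hw0 : w.toNat = 0 := by omega
    have hhw0 : (h * w).toNat = 0 := by
      have : h * w ≤ 0 := Int.mul_nonpos_of_nonneg_of_nonpos (le_of_lt hpos) (by omega)
      omega
    rw [hw0, hhw0]
    simp [PySem.List.slice]

-- ===== VERDICT (by name: the statement is the Claim_ definition above) =====
theorem draw_crt_spec : Claim_equal_draw_crt := by
  intro register h w _ _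
  unfold Spec_draw_crt
  exact draw_crt_spec' register h w
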